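-- pv_equiv track=rewrite | github.com/lazynet/lazy-harness | src/lazy_harness/hooks/builtins/context_inject.py | _strip_intro_lines
-- ===== SOURCE A (Python) =====
-- def _strip_intro_lines(text: str, extra_skip_prefixes: tuple[str, ...] = ()) -> list[str]:
--     """Mimic the bash sed for LazyNorth body extraction:
--     strip frontmatter, H1 title, specific intro lines, and blank lines."""
--     out: list[str] = []
--     in_fm = False
--     fm_done = False
--     for line in text.splitlines():
--         stripped = line.strip()
--         if stripped == "---":
--             if not fm_done and not in_fm:
--                 in_fm = True
--                 continue
--             if in_fm:
--                 in_fm = False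
--                 fm_done = True
--                 continue
--         if in_fm:
--             continue
--         if stripped.startswith("# "):
--             continue
--         if any(stripped.startswith(p) for p in extra_skip_prefixes):
--             continue
--         if not stripped:
--             continue
--         out.append(line)
--     return out
-- ===== SOURCE B (Python) =====
-- def _strip_intro_lines(text: str, extra_skip_prefixes: tuple[str, ...] = ()) -> list[str]:
--     """Two-phase version: locate the frontmatter span explicitly, then filter the body."""
--     lines = text.splitlines()
--     open_i = next((i for i, l in enumerate(lines) if l.strip() == "---"), None)
--     if open_i is None:
--         body = lines
--     else:
--         close_i = next((i for i in range(open_i + 1, len(lines)) if lines[i].strip() == "---"), None)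
--         if close_i is None:
--             body = lines[:open_i]
--         else:
--             body = lines[:open_i] + lines[close_i + 1:]
--
--     def keep(line: str) -> bool:
--         s = line.strip()
--         return bool(s) and not s.startswith("# ") and not any(s.startswith(p) for p in extra_skip_prefixes)
--
--     return [l for l in body if keep(l)]
-- ===== Notes on version B (the rewrite author's own statement) =====
-- stated objective: simpler
-- what changed: Replaces the in_fm/fm_done state machine with an explicit two-phase computation: first locate the frontmatter span (first '---' line and its closer, if any) and splice it out, then apply one stateless keep-filter to the remaining lines.
import Mathlib
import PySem

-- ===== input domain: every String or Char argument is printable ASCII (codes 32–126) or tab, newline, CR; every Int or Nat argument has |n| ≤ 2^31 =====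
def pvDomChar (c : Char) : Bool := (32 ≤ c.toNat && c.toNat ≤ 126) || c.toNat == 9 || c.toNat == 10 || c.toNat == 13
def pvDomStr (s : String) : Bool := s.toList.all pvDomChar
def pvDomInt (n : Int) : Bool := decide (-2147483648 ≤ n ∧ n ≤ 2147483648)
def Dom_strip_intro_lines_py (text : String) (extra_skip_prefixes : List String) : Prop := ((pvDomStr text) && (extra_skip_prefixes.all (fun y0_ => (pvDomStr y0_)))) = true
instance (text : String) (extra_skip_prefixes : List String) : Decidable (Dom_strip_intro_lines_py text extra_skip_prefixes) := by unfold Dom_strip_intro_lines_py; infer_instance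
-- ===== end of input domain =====

-- B replaces A's in_fm/fm_done state machine with an explicit frontmatter-span computation followed by one stateless filter (objective: simpler).



-- ===== PORT A =====
-- step of A's loop: state = (out, in_fm, fm_done)
def stripA_step (extra_skip_prefixes : List String) (st : List String × Bool × Bool)
    (line : String) : List String × Bool × Bool :=
  let out := st.1
  let in_fm := st.2.1
  let fm_done := st.2.2
  let stripped := PySem.Str.strip line
  -- the tail of the loop body (everything after the "---" branches)
  let rest :=
    if in_fm then st
    else if PySem.Str.startswith stripped "# " then st
    else if extra_skip_prefixes.any (fun p => PySem.Str.startswith stripped p) then st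
    else if stripped = "" then st
    else (out ++ [line], in_fm, fm_done)
  if stripped = "---" then
    if !fm_done && !in_fm then (out, true, fm_done)
    else if in_fm then (out, false, true)
    else rest
  else rest

def strip_intro_lines_py (text : String) (extra_skip_prefixes : List String) : List String :=
  ((PySem.Str.splitlines text).foldl (stripA_step extra_skip_prefixes) ([], false, false)).1

-- ===== PORT B =====
def stripB_keep (extra_skip_prefixes : List String) (line : String) : Bool :=
  let s := PySem.Str.strip line
  !(s = "") && !(PySem.Str.startswith s "# ")
    && !(extra_skip_prefixes.any (fun p => PySem.Str.startswith s p))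

def stripB_isFence (line : String) : Bool := PySem.Str.strip line = "---"

def strip_intro_lines_py_alt (text : String) (extra_skip_prefixes : List String) : List String :=
  let lines := PySem.Str.splitlines text
  let body :=
    match lines.findIdx? stripB_isFence with
    | none => lines
    | some i =>
      match (lines.drop (i + 1)).findIdx? stripB_isFence with
      | none => lines.take i
      | some j => lines.take i ++ lines.drop (i + 1 + j + 1)
  body.filter (stripB_keep extra_skip_prefixes)

-- ===== PRECONDITION & SPEC =====
def Spec_strip_intro_lines_py (text : String) (extra_skip_prefixes : List String) (out : List String) : Prop := out = strip_intro_lines_py_alt text extra_skip_prefixes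
instance (text : String) (extra_skip_prefixes : List String) (out : List String) : Decidable (Spec_strip_intro_lines_py text extra_skip_prefixes out) := by unfold Spec_strip_intro_lines_py; infer_instance

-- ===== CLAIM (what is proved, stated in full; the proofs are below) =====
def Claim_equal_strip_intro_lines_py : Prop := ∀ (text : String) (extra_skip_prefixes : List String), Dom_strip_intro_lines_py text extra_skip_prefixes → Spec_strip_intro_lines_py text extra_skip_prefixes (strip_intro_lines_py text extra_skip_prefixes)

-- ===== LEMMAS AND PROOFS =====

theorem filter_drop_cons {A : Type} {p : A → Bool} {x : A} {t : List A} {m n : Nat}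
    (h : m = n + 1) : List.filter p (List.drop n t) = List.filter p (List.drop m (x :: t)) := by
  subst h; simp

-- STEP LEMMAS: what one iteration of A's loop does in each of the three reachable states
theorem step_post (ps : List String) (out : List String) (l : String) :
    stripA_step ps (out, false, true) l
      = (out ++ (if stripB_keep ps l then [l] else []), false, true) := by
  unfold stripA_step stripB_keep
  by_cases hf : PySem.Str.strip l = "---" <;>
  by_cases hsw : PySem.Str.startswith (PySem.Str.strip l) "# " = true <;>
  by_cases hany : ps.any (fun p => PySem.Str.startswith (PySem.Str.strip l) p) = true <;>
  by_cases hemp : PySem.Str.strip l = "" <;>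
    simp_all

theorem step_pre_nofence (ps : List String) (out : List String) (l : String)
    (hf : ¬ PySem.Str.strip l = "---") :
    stripA_step ps (out, false, false) l
      = (out ++ (if stripB_keep ps l then [l] else []), false, false) := by
  unfold stripA_step stripB_keep
  by_cases hsw : PySem.Str.startswith (PySem.Str.strip l) "# " = true <;>
  by_cases hany : ps.any (fun p => PySem.Str.startswith (PySem.Str.strip l) p) = true <;>
  by_cases hemp : PySem.Str.strip l = "" <;>
    simp_all

theorem step_pre_fence (ps : List String) (out : List String) (l : String)
    (hf : PySem.Str.strip l = "---") :
    stripA_step ps (out, false, false) l = (out, true, false) := by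
  unfold stripA_step
  simp [hf]

theorem step_infm_fence (ps : List String) (out : List String) (l : String)
    (hf : PySem.Str.strip l = "---") :
    stripA_step ps (out, true, false) l = (out, false, true) := by
  unfold stripA_step
  simp [hf]

theorem step_infm_nofence (ps : List String) (out : List String) (l : String)
    (hf : ¬ PySem.Str.strip l = "---") :
    stripA_step ps (out, true, false) l = (out, true, false) := by
  unfold stripA_step
  simp [hf]

theorem isFence_iff (l : String) : stripB_isFence l = true ↔ PySem.Str.strip l = "---" := by
  simp [stripB_isFence]

theorem isFence_false (l : String) (hf : ¬ PySem.Str.strip l = "---") :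
    stripB_isFence l = false := by
  rw [Bool.eq_false_iff]; intro h; exact hf ((isFence_iff l).mp h)

-- state after the frontmatter block is closed: pure filtering
theorem stripA_post (ps : List String) (ls : List String) (out : List String) :
    ls.foldl (stripA_step ps) (out, false, true)
      = (out ++ ls.filter (stripB_keep ps), false, true) := by
  induction ls generalizing out with
  | nil => simp
  | cons l t ih =>
    simp only [List.foldl_cons, List.filter_cons, step_post]
    rw [ih]
    by_cases hk : stripB_keep ps l <;> simp [hk]

-- inside an open frontmatter block: skip until the closing fence
theorem stripA_infm (ps : List String) (ls : List String) (out : List String) :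
    ls.foldl (stripA_step ps) (out, true, false)
      = (match ls.findIdx? stripB_isFence with
         | none => (out, true, false)
         | some j => (out ++ (ls.drop (j + 1)).filter (stripB_keep ps), false, true)) := by
  induction ls generalizing out with
  | nil => simp
  | cons l t ih =>
    rw [List.findIdx?_cons]
    by_cases hf : PySem.Str.strip l = "---"
    · rw [List.foldl_cons, step_infm_fence ps out l hf, stripA_post]
      simp [(isFence_iff l).mpr hf]
    · rw [List.foldl_cons, step_infm_nofence ps out l hf, ih]
      cases h : t.findIdx? stripB_isFence <;>
        simp [isFence_false l hf] <;>
        exact filter_drop_cons (by omega)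

-- before any frontmatter: B's explicit span computation
theorem stripA_pre (ps : List String) (ls : List String) (out : List String) :
    ls.foldl (stripA_step ps) (out, false, false)
      = (match ls.findIdx? stripB_isFence with
         | none => (out ++ ls.filter (stripB_keep ps), false, false)
         | some i =>
           match (ls.drop (i + 1)).findIdx? stripB_isFence with
           | none => (out ++ (ls.take i).filter (stripB_keep ps), true, false)
           | some j => (out ++ (ls.take i ++ ls.drop (i + 1 + j + 1)).filter (stripB_keep ps),
               false, true)) := by
  induction ls generalizing out with
  | nil => simp
  | cons l t ih =>
    rw [List.findIdx?_cons]
    by_cases hf : PySem.Str.strip l = "---"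
    · rw [List.foldl_cons, step_pre_fence ps out l hf, stripA_infm]
      cases h : t.findIdx? stripB_isFence <;>
        simp [h, (isFence_iff l).mpr hf] <;>
        rw [Nat.add_comm 1 _]
    · rw [List.foldl_cons, step_pre_nofence ps out l hf, ih]
      cases h : t.findIdx? stripB_isFence with
      | none =>
        by_cases hk : stripB_keep ps l <;>
          simp [h, isFence_false l hf, hk]
      | some i =>
        have hdrop : (l :: t).drop (i + 1 + 1) = t.drop (i + 1) := by simp
        cases h2 : (t.drop (i + 1)).findIdx? stripB_isFence with
        | none =>
          by_cases hk : stripB_keep ps l <;>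
            simp [h, h2, isFence_false l hf, hk, Nat.add_comm, Nat.add_left_comm]
        | some j =>
          by_cases hk : stripB_keep ps l <;>
            simp [h, h2, isFence_false l hf, hk, Nat.add_comm, Nat.add_left_comm] <;>
            exact filter_drop_cons (by omega)

-- ===== VERDICT (by name: the statement is the Claim_ definition above) =====
theorem strip_intro_lines_py_spec : Claim_equal_strip_intro_lines_py := by
  intro text ps _
  unfold Spec_strip_intro_lines_py strip_intro_lines_py strip_intro_lines_py_alt
  rw [stripA_pre]
  cases h : (PySem.Str.splitlines text).findIdx? stripB_isFence with
  | none => simp [h]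
  | some i =>
    cases h2 : ((PySem.Str.splitlines text).drop (i + 1)).findIdx? stripB_isFence with
    | none => simp [h, h2]
    | some j => simp [h, h2]
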